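-- pv_equiv track=rewrite | github.com/ishal2005/Airline-Route-Optimization | AI PROJECT.py | csp_path_finder
-- ===== SOURCE A (Python) =====
-- graph = {
--     'A': {'B': 1, 'C': 4},
--     'B': {'C': 2, 'D': 5},
--     'C': {'D': 1},
--     'D': {'E': 3},
--     'E': {}
-- }
--
-- def find_all_paths(graph, start, end, path=[]):
--     path = path + [start]
--     if start == end:
--         return [path]
--     if start not in graph:
--         return []
--     paths = []
--     for node in graph[start]:
--         if node not in path:
--             new_paths = find_all_paths(graph, node, end, path)
--             for p in new_paths:
--                 paths.append(p)
--     return paths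
--
-- def calculate_cost(path):
--     return sum(graph[path[i]].get(path[i+1], 1000) for i in range(len(path)-1))
--
-- def csp_path_finder(start, goal, required_stops=None, banned_stops=None, max_stops=None):
--     all_paths = find_all_paths(graph, start, goal)
--     valid_paths = []
--     for path in all_paths:
--         if required_stops and not all(stop in path for stop in required_stops):
--             continue
--         if banned_stops and any(stop in path for stop in banned_stops):
--             continue
--         if max_stops is not None and len(path) - 1 > max_stops:
--             continue
--         valid_paths.append(path)
--     if not valid_paths:
--         return None, None
--     best_path = min(valid_paths, key=calculate_cost)
--     return best_path, calculate_cost(best_path)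
-- ===== SOURCE B (Python) =====
-- graph = {
--     'A': {'B': 1, 'C': 4},
--     'B': {'C': 2, 'D': 5},
--     'C': {'D': 1},
--     'D': {'E': 3},
--     'E': {}
-- }
--
-- def csp_path_finder(start, goal, required_stops=None, banned_stops=None, max_stops=None):
--     # single DFS threading (path, running cost, incumbent best); prunes banned nodes
--     # and over-long prefixes instead of enumerating all paths, filtering and min-ing
--     def dfs(node, prefix, cost, best):
--         path = prefix + [node]
--         if banned_stops and node in banned_stops:
--             return best
--         if max_stops is not None and len(path) - 1 > max_stops:
--             return best
--         if node == goal: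
--             if required_stops and not all(s in path for s in required_stops):
--                 return best
--             if best is None or cost < best[1]:
--                 return (path, cost)
--             return best
--         for nb, w in graph.get(node, {}).items():
--             if nb not in path:
--                 best = dfs(nb, path, cost + w, best)
--         return best
--     best = dfs(start, [], 0, None)
--     if best is None:
--         return None, None
--     return best[0], best[1]
-- ===== Notes on version B (the rewrite author's own statement) =====
-- stated objective: alternative
-- what changed: Replaces A's three-stage pipeline (enumerate every simple path, then filter by the constraints, then min by cost) with a single DFS that threads the accumulated path, the running edge-cost and an incumbent best result, pruning branches at banned nodes and at prefixes already longer than max_stops.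
import Mathlib
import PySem

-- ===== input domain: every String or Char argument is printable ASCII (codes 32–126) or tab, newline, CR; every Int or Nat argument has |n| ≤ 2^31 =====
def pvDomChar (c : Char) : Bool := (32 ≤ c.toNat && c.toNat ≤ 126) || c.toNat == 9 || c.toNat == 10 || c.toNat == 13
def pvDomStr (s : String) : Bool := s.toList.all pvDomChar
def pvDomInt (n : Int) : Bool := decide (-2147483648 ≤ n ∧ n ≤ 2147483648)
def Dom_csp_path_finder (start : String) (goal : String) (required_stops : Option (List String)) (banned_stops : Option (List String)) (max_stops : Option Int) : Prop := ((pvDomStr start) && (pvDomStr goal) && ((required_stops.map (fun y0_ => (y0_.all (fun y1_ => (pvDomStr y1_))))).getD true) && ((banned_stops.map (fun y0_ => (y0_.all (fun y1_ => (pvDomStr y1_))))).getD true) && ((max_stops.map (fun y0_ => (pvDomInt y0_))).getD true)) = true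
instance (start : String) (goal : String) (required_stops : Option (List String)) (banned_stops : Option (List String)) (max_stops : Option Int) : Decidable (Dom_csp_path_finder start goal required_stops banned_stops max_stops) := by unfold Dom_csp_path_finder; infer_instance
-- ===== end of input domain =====

-- B replaces A's enumerate-all-paths / filter / min pipeline by one DFS that threads the
-- running cost and an incumbent best and prunes banned nodes and over-long prefixes (objective: alternative).

-- ===== PORT A =====

-- the module-level dict literal `graph` as an association list (insertion order)
def graphA : List (String × List (String × Int)) :=
  [("A", [("B", 1), ("C", 4)]), ("B", [("C", 2), ("D", 5)]),
   ("C", [("D", 1)]), ("D", [("E", 3)]), ("E", [])]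

def lookupG (s : String) : Option (List (String × Int)) :=
  (graphA.find? (fun kv => kv.1 == s)).map (·.2)

-- find_all_paths on the fixed graph; `fuel` only makes the recursion structural: the graph has
-- 5 nodes and paths are simple, so a call with fuel 6 never reaches the fuel-0 branch.
def findAllPaths (goal : String) : Nat → String → List String → List (List String)
  | 0, _, _ => []
  | f + 1, s, path =>
    let path' := path ++ [s]
    if s = goal then [path']
    else
      match lookupG s with
      | none => []
      | some nbs =>
        nbs.foldl (fun acc nb => if nb.1 ∈ path' then acc else acc ++ findAllPaths goal f nb.1 path') []

-- graph[u].get(v, 1000); the `none` branch is Python's KeyError, unreachable on the paths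
-- find_all_paths produces (every non-final path node is a graph key)
def edgeCost (u v : String) : Int :=
  match lookupG u with
  | some nbs => (((nbs.find? (fun kv => kv.1 == v)).map (·.2)).getD 1000)
  | none => 1000

-- sum of edge costs over consecutive pairs (Python's sum over range(len(path)-1))
def calcCost : List String → Int
  | u :: v :: rest => edgeCost u v + calcCost (v :: rest)
  | _ => 0

def reqFail (required_stops : Option (List String)) (p : List String) : Bool :=
  match required_stops with
  | none => false
  | some rs => !rs.isEmpty && !(rs.all (fun s => s ∈ p))

def banFail (banned_stops : Option (List String)) (p : List String) : Bool :=
  match banned_stops with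
  | none => false
  | some bs => !bs.isEmpty && (bs.any (fun s => s ∈ p))

def maxFail (max_stops : Option Int) (len : Nat) : Bool :=
  match max_stops with
  | none => false
  | some m => decide ((len : Int) - 1 > m)

def csp_path_finder (start : String) (goal : String) (required_stops : Option (List String)) (banned_stops : Option (List String)) (max_stops : Option Int) : Option (List String) × Option Int :=
  let all_paths := findAllPaths goal 6 start []
  let valid_paths := all_paths.foldl
    (fun acc p =>
      if reqFail required_stops p then acc
      else if banFail banned_stops p then acc
      else if maxFail max_stops p.length then acc
      else acc ++ [p]) []
  match PySem.List.min? valid_paths calcCost with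
  | none => (none, none)
  | some bp => (some bp, some (calcCost bp))

-- ===== PORT B =====

-- dfs(node, prefix, cost, best) from Source B; same fuel remark as for findAllPaths
def dfsB (goal : String) (required_stops : Option (List String)) (banned_stops : Option (List String)) (max_stops : Option Int) : Nat → String → List String → Int → Option (List String × Int) → Option (List String × Int)
  | 0, _, _, _, best => best
  | f + 1, node, pfx, cost, best =>
    let path := pfx ++ [node]
    if banFail banned_stops [node] then best
    else if maxFail max_stops path.length then best
    else if node = goal then
      if reqFail required_stops path then best
      else
        match best with
        | none => some (path, cost)
        | some b => if cost < b.2 then some (path, cost) else best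
    else
      match lookupG node with
      | none => best
      | some nbs =>
        nbs.foldl (fun b nb => if nb.1 ∈ path then b else dfsB goal required_stops banned_stops max_stops f nb.1 path (cost + nb.2) b) best

def csp_path_finder_alt (start : String) (goal : String) (required_stops : Option (List String)) (banned_stops : Option (List String)) (max_stops : Option Int) : Option (List String) × Option Int :=
  match dfsB goal required_stops banned_stops max_stops 6 start [] 0 none with
  | none => (none, none)
  | some b => (some b.1, some b.2)

-- ===== PRECONDITION & SPEC =====
def Spec_csp_path_finder (start : String) (goal : String) (required_stops : Option (List String)) (banned_stops : Option (List String)) (max_stops : Option Int) (out : Option (List String) × Option Int) : Prop := out = csp_path_finder_alt start goal required_stops banned_stops max_stops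
instance (start : String) (goal : String) (required_stops : Option (List String)) (banned_stops : Option (List String)) (max_stops : Option Int) (out : Option (List String) × Option Int) : Decidable (Spec_csp_path_finder start goal required_stops banned_stops max_stops out) := by unfold Spec_csp_path_finder; infer_instance

-- ===== CLAIM (what is proved, stated in full; the proofs are below) =====
def Claim_equal_csp_path_finder : Prop := ∀ (start : String) (goal : String) (required_stops : Option (List String)) (banned_stops : Option (List String)) (max_stops : Option Int), Dom_csp_path_finder start goal required_stops banned_stops max_stops → Spec_csp_path_finder start goal required_stops banned_stops max_stops (csp_path_finder start goal required_stops banned_stops max_stops)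

-- ===== LEMMAS AND PROOFS =====

-- A's three-`continue` filter as one predicate
def validA (required_stops : Option (List String)) (banned_stops : Option (List String)) (max_stops : Option Int) (p : List String) : Bool :=
  !reqFail required_stops p && !banFail banned_stops p && !maxFail max_stops p.length

-- B's incumbent update
def updMin (b : Option (List String × Int)) (p : List String) (c : Int) : Option (List String × Int) :=
  match b with
  | none => some (p, c)
  | some m => if c < m.2 then some (p, c) else b

theorem foldl_if_append {α β : Type} (p : β → Prop) [DecidablePred p] (g : β → List α) (l : List β) (acc : List α) :
    l.foldl (fun a x => if p x then a else a ++ g x) acc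
      = acc ++ l.flatMap (fun x => if p x then [] else g x) := by
  induction l generalizing acc with
  | nil => simp
  | cons x t ih => by_cases hx : p x <;> simp [hx, ih]

theorem foldl_flatMap' {α β σ : Type} (g : β → List α) (f : σ → α → σ) (l : List β) (i : σ) :
    (l.flatMap g).foldl f i = l.foldl (fun s x => (g x).foldl f s) i := by
  induction l generalizing i <;> simp [List.foldl_append, *]

-- every path produced from state (s, path) extends path ++ [s]
theorem mem_findAllPaths_shape (goal : String) : ∀ (fuel : Nat) (s : String) (path p : List String),
    p ∈ findAllPaths goal fuel s path → ∃ r, p = path ++ s :: r := by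
  intro fuel
  induction fuel with
  | zero => intro s path p h; simp [findAllPaths] at h
  | succ f ih =>
    intro s path p h
    simp only [findAllPaths] at h
    by_cases hg : s = goal
    · rw [if_pos hg] at h
      simp at h
      exact ⟨[], by simp [h]⟩
    · rw [if_neg hg] at h
      cases hL : lookupG s with
      | none => rw [hL] at h; simp at h
      | some nbs =>
        rw [hL] at h
        simp only at h
        rw [foldl_if_append (fun nb : String × Int => nb.1 ∈ path ++ [s])
              (fun nb => findAllPaths goal f nb.1 (path ++ [s])) nbs []] at h
        simp only [List.nil_append, List.mem_flatMap] at h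
        obtain ⟨nb, _hnb, hp⟩ := h
        by_cases hmem : nb.1 ∈ path ++ [s]
        · simp [hmem] at hp
        · rw [if_neg hmem] at hp
          obtain ⟨r', hr⟩ := ih nb.1 (path ++ [s]) p hp
          exact ⟨nb.1 :: r', by simp [hr]⟩

-- adjacency weights are the edge costs (keys in each adjacency list are distinct)
theorem edgeCost_of_mem (u : String) (nbs : List (String × Int)) (h : lookupG u = some nbs) :
    ∀ nb ∈ nbs, edgeCost u nb.1 = nb.2 := by
  by_cases h1 : u = "A"
  · subst h1; simp [lookupG, graphA] at h; subst h; intro nb hnb; fin_cases hnb <;> decide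
  by_cases h2 : u = "B"
  · subst h2; simp [lookupG, graphA] at h; subst h; intro nb hnb; fin_cases hnb <;> decide
  by_cases h3 : u = "C"
  · subst h3; simp [lookupG, graphA] at h; subst h; intro nb hnb; fin_cases hnb; decide
  by_cases h4 : u = "D"
  · subst h4; simp [lookupG, graphA] at h; subst h; intro nb hnb; fin_cases hnb; decide
  by_cases h5 : u = "E"
  · subst h5; simp [lookupG, graphA] at h; subst h; intro nb hnb; fin_cases hnb
  · exfalso
    have e1 : (("A" : String) == u) = false := beq_eq_false_iff_ne.mpr (Ne.symm h1)
    have e2 : (("B" : String) == u) = false := beq_eq_false_iff_ne.mpr (Ne.symm h2)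
    have e3 : (("C" : String) == u) = false := beq_eq_false_iff_ne.mpr (Ne.symm h3)
    have e4 : (("D" : String) == u) = false := beq_eq_false_iff_ne.mpr (Ne.symm h4)
    have e5 : (("E" : String) == u) = false := beq_eq_false_iff_ne.mpr (Ne.symm h5)
    simp [lookupG, graphA, List.find?, e1, e2, e3, e4, e5] at h

theorem calcCost_snoc (xs : List String) (u v : String) :
    calcCost (xs ++ [u, v]) = calcCost (xs ++ [u]) + edgeCost u v := by
  induction xs with
  | nil => simp [calcCost]
  | cons a t ih =>
    cases t with
    | nil => simp [calcCost]
    | cons b t' =>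
      simp only [List.cons_append, calcCost] at *
      rw [ih]; ring

theorem banFail_iff (bs : List String) (p : List String) :
    banFail (some bs) p = true ↔ bs ≠ [] ∧ ∃ x ∈ bs, x ∈ p := by
  simp [banFail]

theorem validA_false_of_ban (req : Option (List String)) (ban : Option (List String)) (ms : Option Int)
    (s : String) (hb : banFail ban [s] = true) (p : List String) (hs : s ∈ p) :
    validA req ban ms p = false := by
  cases ban with
  | none => simp [banFail] at hb
  | some bs =>
    obtain ⟨hne, x, hxbs, hxs⟩ := (banFail_iff bs [s]).mp hb
    have hx : x = s := by simpa using hxs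
    have hbp : banFail (some bs) p = true := (banFail_iff bs p).mpr ⟨hne, x, hxbs, hx ▸ hs⟩
    simp [validA, hbp]

theorem maxFail_mono (ms : Option Int) (L L' : Nat) (h : maxFail ms L = true) (hle : L ≤ L') :
    maxFail ms L' = true := by
  cases ms with
  | none => simp [maxFail] at h
  | some m => simp [maxFail] at h ⊢; omega

theorem banFail_append_false (ban : Option (List String)) (path : List String) (s : String)
    (hban : ∀ x ∈ path, banFail ban [x] = false) (hb : banFail ban [s] = false) :
    banFail ban (path ++ [s]) = false := by
  cases ban with
  | none => simp [banFail]
  | some bs =>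
    cases hB : banFail (some bs) (path ++ [s]) with
    | false => rfl
    | true =>
      exfalso
      obtain ⟨hne, x, hxbs, hxp⟩ := (banFail_iff bs (path ++ [s])).mp hB
      rcases List.mem_append.mp hxp with hxpath | hxs
      · have hfalse : ¬ (bs ≠ [] ∧ ∃ y ∈ bs, y ∈ [x]) := by
          rw [← banFail_iff]; simp [hban x hxpath]
        exact hfalse ⟨hne, x, hxbs, by simp⟩
      · have hx : x = s := by simpa using hxs
        have hfalse : ¬ (bs ≠ [] ∧ ∃ y ∈ bs, y ∈ [s]) := by
          rw [← banFail_iff]; simp [hb]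
        exact hfalse ⟨hne, x, hxbs, by simp [hx]⟩

-- main invariant: the DFS with incumbent equals folding the min-update over A's path list
theorem dfsB_eq_foldl (goal : String) (req ban : Option (List String)) (ms : Option Int) :
    ∀ (fuel : Nat) (s : String) (path : List String) (cost : Int) (best : Option (List String × Int)),
      cost = calcCost (path ++ [s]) →
      (∀ x ∈ path, banFail ban [x] = false) →
      dfsB goal req ban ms fuel s path cost best =
        (findAllPaths goal fuel s path).foldl
          (fun b p => if validA req ban ms p then updMin b p (calcCost p) else b) best := by
  intro fuel
  induction fuel with
  | zero => intro s path cost best _ _; simp [dfsB, findAllPaths]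
  | succ f ih =>
    intro s path cost best hc hban
    simp only [dfsB]
    by_cases hb : banFail ban [s] = true
    · rw [if_pos hb]
      rw [PySem.List.foldl_if_eq_foldl_filter]
      have hfil : (findAllPaths goal (f + 1) s path).filter (validA req ban ms) = [] := by
        rw [List.filter_eq_nil_iff]
        intro p hp
        obtain ⟨r, rfl⟩ := mem_findAllPaths_shape goal (f + 1) s path p hp
        have hv := validA_false_of_ban req ban ms s hb (path ++ s :: r) (by simp)
        simp [hv]
      rw [hfil]; rfl
    · rw [if_neg hb]
      by_cases hm : maxFail ms (path ++ [s]).length = true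
      · rw [if_pos hm]
        rw [PySem.List.foldl_if_eq_foldl_filter]
        have hfil : (findAllPaths goal (f + 1) s path).filter (validA req ban ms) = [] := by
          rw [List.filter_eq_nil_iff]
          intro p hp
          obtain ⟨r, rfl⟩ := mem_findAllPaths_shape goal (f + 1) s path p hp
          have hmax : maxFail ms (path ++ s :: r).length = true :=
            maxFail_mono ms (path ++ [s]).length (path ++ s :: r).length hm (by simp)
          simp only [validA, Bool.and_eq_true, Bool.not_eq_eq_eq_not, Bool.not_true]
          intro hand
          rw [hmax] at hand
          simp at hand
        rw [hfil]; rfl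
      · rw [if_neg hm]
        by_cases hg : s = goal
        · rw [if_pos hg]
          have hfe : findAllPaths goal (f + 1) s path = [path ++ [s]] := by
            simp [findAllPaths, hg]
          rw [hfe]
          simp only [List.foldl_cons, List.foldl_nil]
          have hbf : banFail ban (path ++ [s]) = false :=
            banFail_append_false ban path s hban (Bool.eq_false_iff.mpr hb)
          have hmf : maxFail ms (path ++ [s]).length = false := Bool.eq_false_iff.mpr hm
          by_cases hr : reqFail req (path ++ [s]) = true
          · rw [if_pos hr]
            have hv : validA req ban ms (path ++ [s]) = false := by simp [validA, hr]
            rw [hv]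
            simp
          · rw [if_neg hr]
            have hv : validA req ban ms (path ++ [s]) = true := by
              simp [validA, Bool.eq_false_iff.mpr hr, hbf,
                    (show maxFail ms (path.length + 1) = false by simpa using hmf)]
            rw [hv]
            simp only [if_true]
            rw [← hc]
            cases best <;> rfl
        · rw [if_neg hg]
          have hfe : findAllPaths goal (f + 1) s path =
              match lookupG s with
              | none => []
              | some nbs =>
                nbs.foldl (fun acc nb => if nb.1 ∈ path ++ [s] then acc
                  else acc ++ findAllPaths goal f nb.1 (path ++ [s])) [] := by
            simp [findAllPaths, hg]
          rw [hfe]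
          cases hL : lookupG s with
          | none => rfl
          | some nbs =>
            simp only
            rw [foldl_if_append (fun nb : String × Int => nb.1 ∈ path ++ [s])
                  (fun nb => findAllPaths goal f nb.1 (path ++ [s])) nbs []]
            simp only [List.nil_append]
            rw [foldl_flatMap']
            apply PySem.List.foldl_congr_mem
            intro b nb hnb
            by_cases hmem : nb.1 ∈ path ++ [s]
            · simp [hmem]
            · rw [if_neg hmem, if_neg hmem]
              rw [ih nb.1 (path ++ [s]) (cost + nb.2) b]
              · rw [hc, show (path ++ [s]) ++ [nb.1] = path ++ [s, nb.1] by simp,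
                    calcCost_snoc, edgeCost_of_mem s nbs hL nb hnb]
              · intro x hx
                rcases List.mem_append.mp hx with hxp | hxs
                · exact hban x hxp
                · have hx' : x = s := by simpa using hxs
                  subst hx'
                  exact Bool.eq_false_iff.mpr hb

-- min?'s fold with the key paired in
theorem foldl_updMin_gen (l : List (List String)) (acc : Option (List String)) :
    l.foldl (fun b p => updMin b p (calcCost p)) (acc.map fun m => (m, calcCost m)) =
      (l.foldl (fun a x =>
          match a with
          | none => some x
          | some m => if calcCost x < calcCost m then some x else some m) acc).map
        (fun m => (m, calcCost m)) := by
  induction l generalizing acc with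
  | nil => rfl
  | cons x t ih =>
    have hstep : updMin (acc.map fun m => (m, calcCost m)) x (calcCost x) =
        ((match acc with
          | none => some x
          | some m => if calcCost x < calcCost m then some x else some m).map
            fun m => (m, calcCost m)) := by
      cases acc with
      | none => rfl
      | some m => simp only [Option.map_some, updMin]; split <;> simp
    simp only [List.foldl_cons, hstep, ih]

theorem foldl_updMin_eq_min? (l : List (List String)) :
    l.foldl (fun b p => updMin b p (calcCost p)) none =
      (PySem.List.min? l calcCost).map (fun m => (m, calcCost m)) := by
  have h := foldl_updMin_gen l none
  simp only [Option.map_none] at h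
  rw [h]
  congr 1
  unfold PySem.List.min?
  apply PySem.List.foldl_congr_mem
  intro acc x _
  cases acc <;> rfl

-- ===== VERDICT (by name: the statement is the Claim_ definition above) =====
theorem csp_path_finder_spec : Claim_equal_csp_path_finder := by
  intro start goal req ban ms _dom
  unfold Spec_csp_path_finder csp_path_finder csp_path_finder_alt
  dsimp only
  have hstep : (fun (acc : List (List String)) p =>
      if reqFail req p then acc
      else if banFail ban p then acc
      else if maxFail ms p.length then acc
      else acc ++ [p]) = (fun acc p => if validA req ban ms p then acc ++ [p] else acc) := by
    funext acc p
    cases hr : reqFail req p <;> cases hb : banFail ban p <;> cases hm : maxFail ms p.length <;>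
      simp [validA, hr, hb, hm]
  rw [hstep, PySem.List.foldl_append_if_eq_filter]
  rw [dfsB_eq_foldl goal req ban ms 6 start [] 0 none (by simp [calcCost]) (by simp)]
  rw [PySem.List.foldl_if_eq_foldl_filter, foldl_updMin_eq_min?]
  simp only [List.nil_append]
  cases h : PySem.List.min? ((findAllPaths goal 6 start []).filter (validA req ban ms)) calcCost with
  | none => simp
  | some m => simp
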